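-- pv_equiv track=rewrite | github.com/hmghaly/word_align | align_utils.py | get_tokens_ngrams
-- ===== SOURCE A (Python) =====
-- def get_tokens_ngrams(tokens0,max_ngram_size=5):
--   all_phrases=[]
--   for size0 in range(1,max_ngram_size+1):
--     for token_i in range(0,len(tokens0)-size0+1):
--       cur_phrase_tokens=tokens0[token_i:token_i+size0]
--       cur_phrase=" ".join(cur_phrase_tokens) #tokens0[token_i:token_i+size0]
--       span=(token_i,token_i+size0)
--       all_phrases.append((cur_phrase, span))
--   return all_phrases
-- ===== SOURCE B (Python) =====
-- def get_tokens_ngrams(tokens0, max_ngram_size=5):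
--     if max_ngram_size < 1:
--         return []
--     n = len(tokens0)
--     row = list(zip(tokens0, range(n)))
--     all_phrases = [(tok, (i, i + 1)) for tok, i in row]
--     for size in range(2, max_ngram_size + 1):
--         row = [(phrase + " " + tokens0[start + size - 1], start)
--                for phrase, start in row if start + size <= n]
--         all_phrases.extend((phrase, (start, start + size)) for phrase, start in row)
--     return all_phrases
-- ===== Notes on version B (the rewrite author's own statement) =====
-- stated objective: alternative
-- what changed: Instead of re-slicing and re-joining each window of each size, B keeps a running row of the previous size's (phrase, start) pairs and extends each phrase by one token per size, emitting the rows size-major in the same order.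
import Mathlib
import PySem

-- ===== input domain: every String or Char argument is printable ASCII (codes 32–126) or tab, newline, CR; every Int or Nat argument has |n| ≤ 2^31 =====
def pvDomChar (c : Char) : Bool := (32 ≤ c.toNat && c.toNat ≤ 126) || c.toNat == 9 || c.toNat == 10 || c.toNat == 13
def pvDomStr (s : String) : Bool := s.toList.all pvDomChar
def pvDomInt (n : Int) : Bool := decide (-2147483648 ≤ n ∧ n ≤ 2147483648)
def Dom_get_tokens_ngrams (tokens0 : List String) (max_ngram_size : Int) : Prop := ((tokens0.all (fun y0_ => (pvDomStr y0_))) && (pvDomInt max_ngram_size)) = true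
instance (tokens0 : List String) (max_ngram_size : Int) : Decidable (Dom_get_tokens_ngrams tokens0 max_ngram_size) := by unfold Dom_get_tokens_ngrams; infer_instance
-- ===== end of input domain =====

-- B replaces A's per-window re-slice-and-rejoin with a running row of the previous size's
-- (phrase, start) pairs, extending each phrase by one token per size (objective: alternative).

-- ===== PORT A =====
def get_tokens_ngrams (tokens0 : List String) (max_ngram_size : Int) : List (String × (Int × Int)) :=
  (PySem.List.pyRange 1 (max_ngram_size + 1)).foldl (fun all_phrases size0 =>
    (PySem.List.pyRange 0 (PySem.List.len tokens0 - size0 + 1)).foldl (fun acc token_i =>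
      let cur_phrase_tokens := PySem.List.slice tokens0 (some token_i) (some (token_i + size0))
      let cur_phrase := PySem.Str.join " " cur_phrase_tokens
      let span := (token_i, token_i + size0)
      acc ++ [(cur_phrase, span)]) all_phrases) []

-- ===== PORT B =====
def get_tokens_ngrams_alt (tokens0 : List String) (max_ngram_size : Int) : List (String × (Int × Int)) :=
  if max_ngram_size < 1 then []
  else
    let n : Int := PySem.List.len tokens0
    let row0 : List (String × Int) := tokens0.zip (PySem.List.pyRange 0 n)
    let all0 : List (String × (Int × Int)) := row0.map (fun ti => (ti.1, (ti.2, ti.2 + 1)))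
    ((PySem.List.pyRange 2 (max_ngram_size + 1)).foldl (fun st size =>
        let row := (st.1.filter (fun pi => decide (pi.2 + size ≤ n))).map
          (fun pi => (pi.1 ++ " " ++ PySem.List.pyGetD tokens0 (pi.2 + size - 1) "", pi.2))
        (row, st.2 ++ row.map (fun pi => (pi.1, (pi.2, pi.2 + size)))))
      (row0, all0)).2

-- ===== PRECONDITION & SPEC =====
def Spec_get_tokens_ngrams (tokens0 : List String) (max_ngram_size : Int) (out : List (String × (Int × Int))) : Prop := out = get_tokens_ngrams_alt tokens0 max_ngram_size
instance (tokens0 : List String) (max_ngram_size : Int) (out : List (String × (Int × Int))) : Decidable (Spec_get_tokens_ngrams tokens0 max_ngram_size out) := by unfold Spec_get_tokens_ngrams; infer_instance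

-- ===== CLAIM (what is proved, stated in full; the proofs are below) =====
def Claim_equal_get_tokens_ngrams : Prop := ∀ (tokens0 : List String) (max_ngram_size : Int), Dom_get_tokens_ngrams tokens0 max_ngram_size → Spec_get_tokens_ngrams tokens0 max_ngram_size (get_tokens_ngrams tokens0 max_ngram_size)

-- ===== LEMMAS AND PROOFS =====

-- the row of all (phrase, start) pairs of window size s, and its (phrase, span) form
def ngRow (tokens0 : List String) (s : Nat) : List (String × Int) :=
  (List.range (tokens0.length + 1 - s)).map
    (fun i => (PySem.Str.join " " ((tokens0.drop i).take s), (i : Int)))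

def ngOut (tokens0 : List String) (s : Nat) : List (String × (Int × Int)) :=
  (ngRow tokens0 s).map (fun pi => (pi.1, (pi.2, pi.2 + (s : Int))))

-- " ".join(parts + [t]) = " ".join(parts) + " " + t for nonempty parts (char level)
lemma chars_join_append (sep t p : List Char) (parts : List (List Char)) :
    PySem.Chars.join sep ((p :: parts) ++ [t]) = PySem.Chars.join sep (p :: parts) ++ sep ++ t := by
  induction parts generalizing p with
  | nil => simp [PySem.Chars.join_cons_cons, PySem.Chars.join_singleton]
  | cons q rest ih =>
      simp only [List.cons_append, PySem.Chars.join_cons_cons]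
      rw [show q :: (rest ++ [t]) = (q :: rest) ++ [t] from rfl, ih q]
      simp [List.append_assoc]

lemma str_join_singleton (t : String) : PySem.Str.join " " [t] = t := by
  apply String.toList_inj.mp
  simp [PySem.Str.toList_join, PySem.Chars.join_singleton]

lemma filter_range_lt (n m : Nat) (h : m ≤ n) :
    (List.range n).filter (fun i => decide (i < m)) = List.range m := by
  rw [show n = m + (n - m) by omega, List.range_add, List.filter_append]
  rw [List.filter_eq_self.mpr (by intro a ha; simp at ha ⊢; omega),
      List.filter_eq_nil_iff.mpr (by intro a ha; simp at ha ⊢; omega)]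
  simp

lemma str_join_append (p t : String) (parts : List String) :
    PySem.Str.join " " ((p :: parts) ++ [t]) = PySem.Str.join " " (p :: parts) ++ " " ++ t := by
  apply String.toList_inj.mp
  simp only [PySem.Str.toList_join, List.map_append, List.map_cons, List.map_nil, String.toList_append]
  rw [chars_join_append]

lemma str_join_snoc (ts : List String) (h : ts ≠ []) (t : String) :
    PySem.Str.join " " (ts ++ [t]) = PySem.Str.join " " ts ++ " " ++ t := by
  obtain ⟨p, parts, rfl⟩ := List.exists_cons_of_ne_nil h
  exact str_join_append p t parts

-- A's inner loop for one size s ≥ 1 appends exactly ngOut tokens0 s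
lemma A_inner (tokens0 : List String) (s : Nat) (hs : 1 ≤ s)
    (acc : List (String × (Int × Int))) :
    (PySem.List.pyRange 0 (PySem.List.len tokens0 - (s : Int) + 1)).foldl (fun acc token_i =>
      acc ++ [(PySem.Str.join " " (PySem.List.slice tokens0 (some token_i) (some (token_i + (s : Int)))),
               (token_i, token_i + (s : Int)))]) acc
    = acc ++ ngOut tokens0 s := by
  rw [PySem.List.foldl_append_singleton_eq_map]
  congr 1
  rw [PySem.List.pyRange_one]
  have hN : ((PySem.List.len tokens0) - (s : Int) + 1 - 0).toNat = tokens0.length + 1 - s := by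
    simp [PySem.List.len]; omega
  rw [hN]
  unfold ngOut ngRow
  simp only [List.map_map]
  apply List.map_congr_left
  intro i hi
  simp only [List.mem_range] at hi
  have hcast : (i : Int) + (s : Int) = ((i + s : Nat) : Int) := by push_cast; ring
  have hslice : PySem.List.slice tokens0 (some (i : Int)) (some ((i : Int) + (s : Int)))
      = (tokens0.drop i).take s := by
    rw [hcast, PySem.List.slice_toNat _ (by positivity) (by positivity)]
    congr 1
    omega
  simp [hslice]

-- B's size-(s+1) row from the size-s row
lemma B_row_step (tokens0 : List String) (s : Nat) (hs : 1 ≤ s) :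
    ((ngRow tokens0 s).filter (fun pi => decide (pi.2 + ((s : Int) + 1) ≤ PySem.List.len tokens0))).map
      (fun pi => (pi.1 ++ " " ++ PySem.List.pyGetD tokens0 (pi.2 + ((s : Int) + 1) - 1) "", pi.2))
    = ngRow tokens0 (s + 1) := by
  unfold ngRow
  rw [List.filter_map, List.map_map]
  have hfil : (List.range (tokens0.length + 1 - s)).filter
      ((fun pi : String × Int => decide (pi.2 + ((s : Int) + 1) ≤ PySem.List.len tokens0)) ∘
        (fun i => (PySem.Str.join " " ((tokens0.drop i).take s), (i : Int))))
      = List.range (tokens0.length - s) := by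
    rw [List.filter_congr (q := fun i => decide (i < tokens0.length - s)) ?hc]
    · exact filter_range_lt _ _ (by omega)
    · intro i _
      simp [PySem.List.len]
      omega
  rw [hfil, show tokens0.length + 1 - (s + 1) = tokens0.length - s by omega]
  apply List.map_congr_left
  intro i hi
  simp only [List.mem_range] at hi
  have his : i + s < tokens0.length := by omega
  have hget : PySem.List.pyGetD tokens0 ((i : Int) + ((s : Int) + 1) - 1) ""
      = tokens0[i + s] := by
    have : (i : Int) + ((s : Int) + 1) - 1 = ((i + s : Nat) : Int) := by push_cast; ring
    rw [this, PySem.List.pyGetD_natCast, List.getD_eq_getElem _ _ his]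
  have htake : (tokens0.drop i).take (s + 1) = (tokens0.drop i).take s ++ [tokens0[i + s]] := by
    rw [List.take_add_one]
    congr 1
    rw [List.getElem?_drop, List.getElem?_eq_getElem (by omega)]
    rfl
  have hne : (tokens0.drop i).take s ≠ [] := by
    have : ((tokens0.drop i).take s).length = s := by
      simp [List.length_take, List.length_drop]; omega
    intro hnil; rw [hnil] at this; simp at this; omega
  simp only [Function.comp_apply, hget]
  rw [htake, str_join_snoc _ hne]

-- B's fold over sizes 2..k+1 starting from the size-1 state
lemma B_loop (tokens0 : List String) (k : Nat) :
    (PySem.List.pyRange 2 ((k : Int) + 1 + 1)).foldl (fun st size =>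
        let row := (st.1.filter (fun pi => decide (pi.2 + size ≤ PySem.List.len tokens0))).map
          (fun pi => (pi.1 ++ " " ++ PySem.List.pyGetD tokens0 (pi.2 + size - 1) "", pi.2))
        (row, st.2 ++ row.map (fun pi => (pi.1, (pi.2, pi.2 + size)))))
      (ngRow tokens0 1, (List.range 1).flatMap (fun j => ngOut tokens0 (j + 1)))
    = (ngRow tokens0 (k + 1), (List.range (k + 1)).flatMap (fun j => ngOut tokens0 (j + 1))) := by
  induction k with
  | zero =>
      rw [PySem.List.pyRange_one_eq_nil (by norm_num)]
      rfl
  | succ k ih =>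
      have hb : ((k + 1 : Nat) : Int) + 1 + 1 = ((k : Int) + 1 + 1) + 1 := by push_cast; ring
      rw [hb, PySem.List.pyRange_one_succ_right (by omega), List.foldl_append, ih]
      simp only [List.foldl_cons, List.foldl_nil]
      have hsz : (k : Int) + 1 + 1 = ((k + 1 : Nat) : Int) + 1 := by push_cast; ring
      rw [hsz, B_row_step tokens0 (k + 1) (by omega)]
      congr 1
      rw [show (List.range (k + 1 + 1)) = List.range (k + 1) ++ [k + 1] from List.range_succ,
          List.flatMap_append]
      simp only [List.flatMap_cons, List.flatMap_nil, List.append_nil]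
      congr 1

-- B's initial row is the size-1 row
lemma B_row1 (tokens0 : List String) :
    tokens0.zip (PySem.List.pyRange 0 (PySem.List.len tokens0)) = ngRow tokens0 1 := by
  unfold ngRow
  apply List.ext_getElem
  · simp [PySem.List.len, PySem.List.length_pyRange_one]
  · intro i h1 h2
    have hi : i < tokens0.length := by
      simp [PySem.List.len, PySem.List.length_pyRange_one] at h1
      omega
    have htake : (tokens0.drop i).take 1 = [tokens0[i]] := by
      rw [List.take_one, List.head?_drop, List.getElem?_eq_getElem hi]
      rfl
    simp [List.getElem_zip, PySem.List.getElem_pyRange_one, htake, str_join_singleton]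

lemma A_char (tokens0 : List String) (m : Int) :
    get_tokens_ngrams tokens0 m
    = (List.range m.toNat).flatMap (fun j => ngOut tokens0 (j + 1)) := by
  unfold get_tokens_ngrams
  rw [PySem.List.foldl_congr_mem (PySem.List.pyRange 1 (m + 1)) _
        (fun acc size0 => acc ++ ngOut tokens0 size0.toNat) [] ?hcg]
  · rw [PySem.List.foldl_append_eq_flatMap, List.nil_append, PySem.List.pyRange_one,
        List.flatMap_map]
    have hb : (m + 1 - 1).toNat = m.toNat := by omega
    rw [hb]
    have hfun : (fun k : Nat => ngOut tokens0 ((1 + (k : Int)).toNat))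
        = (fun j : Nat => ngOut tokens0 (j + 1)) := by
      funext j
      congr 1
      omega
    rw [hfun]
  · intro acc size0 hmem
    have h1 : 1 ≤ size0 := (PySem.List.mem_pyRange_one.mp hmem).1
    have hs : size0 = ((size0.toNat : Nat) : Int) := by omega
    rw [hs, A_inner tokens0 size0.toNat (by omega) acc]
    rfl

-- ===== VERDICT (by name: the statement is the Claim_ definition above) =====
theorem get_tokens_ngrams_spec : Claim_equal_get_tokens_ngrams := by
  intro tokens0 m _
  unfold Spec_get_tokens_ngrams get_tokens_ngrams_alt
  rw [A_char]
  by_cases hm : m < 1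
  · rw [if_pos hm]
    have : m.toNat = 0 := by omega
    simp [this]
  · rw [if_neg hm]
    obtain ⟨k, rfl⟩ : ∃ k : Nat, m = (k : Int) + 1 := ⟨(m - 1).toNat, by omega⟩
    simp only [B_row1]
    have hall : (ngRow tokens0 1).map (fun ti => (ti.1, (ti.2, ti.2 + 1)))
        = (List.range 1).flatMap (fun j => ngOut tokens0 (j + 1)) := by
      simp [ngOut]
    rw [hall, B_loop tokens0 k]
    have : ((k : Int) + 1).toNat = k + 1 := by omega
    rw [this]
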